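-- pv_equiv track=rewrite | github.com/satwik-61/20_DAYS_TRAINING | Day 10/Palindrome.py | has_valid_palindrome
-- ===== SOURCE A (Python) =====
-- def has_valid_palindrome(s):
--     def is_palindrome(sub):
--         left, right = 0, len(sub) - 1
--         while left < right:
--             if sub[left] != sub[right]:
--                 return False
--             left += 1
--             right -= 1
--         return True
--
--     for start in range(len(s)):
--         for end in range(start + 1, len(s) + 1):
--             sub = s[start:end]
--             if len(sub) > 1 and is_palindrome(sub):
--                 return True
--     return False
-- ===== SOURCE B (Python) =====
-- def has_valid_palindrome(s):
--     # A palindromic substring of length >= 2 exists iff two equal adjacent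
--     # chars or two equal chars at distance 2 exist.  Single O(n) pass.
--     n = len(s)
--     for i in range(n - 1):
--         if s[i] == s[i + 1] or (i + 2 < n and s[i] == s[i + 2]):
--             return True
--     return False
-- ===== Notes on version B (the rewrite author's own statement) =====
-- stated objective: faster
-- what changed: Replaces the enumerate-every-substring-and-test-palindrome triple loop by a single linear scan for a length-2 or length-3 palindrome center (s[i]==s[i+1] or s[i]==s[i+2]), equivalent because every palindrome of length >= 2 contains one; intended as asymptotically faster (O(n) vs O(n^3)); measured up to ~950x at n=262144 on random inputs, though on inputs where A's early return fires immediately both are startup-bound and comparable.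
import Mathlib
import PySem

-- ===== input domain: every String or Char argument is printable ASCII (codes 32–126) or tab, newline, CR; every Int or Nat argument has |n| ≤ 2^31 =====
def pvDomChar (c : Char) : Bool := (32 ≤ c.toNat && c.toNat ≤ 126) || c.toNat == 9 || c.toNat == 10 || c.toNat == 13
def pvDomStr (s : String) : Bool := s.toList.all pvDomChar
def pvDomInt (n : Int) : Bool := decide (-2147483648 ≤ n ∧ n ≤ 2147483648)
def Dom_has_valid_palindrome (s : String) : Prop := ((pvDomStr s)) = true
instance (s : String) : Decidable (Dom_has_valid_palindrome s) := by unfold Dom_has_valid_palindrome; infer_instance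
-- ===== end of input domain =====

-- B replaces A's all-substrings palindrome search by a single linear scan for a
-- length-2/3 palindrome center (equal adjacent chars or equal chars at distance 2);
-- intended as faster (measured up to ~950x on large random inputs; comparable when
-- A's early return fires on the first characters).

-- ===== PORT A =====
-- the inner 'is_palindrome' while-loop: two pointers left/right
def pvIsPalAux (sub : List Char) (left right : Int) : Bool :=
  if _h : left < right then
    if PySem.List.pyGet? sub left ≠ PySem.List.pyGet? sub right then false
    else pvIsPalAux sub (left + 1) (right - 1)
  else true
termination_by (right - left).toNat
decreasing_by omega

def pvIsPalindrome (sub : List Char) : Bool :=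
  pvIsPalAux sub 0 (PySem.List.len sub - 1)

def has_valid_palindrome (s : String) : Bool :=
  (PySem.List.pyRange 0 (PySem.List.len s.toList) 1).any fun start =>
    (PySem.List.pyRange (start + 1) (PySem.List.len s.toList + 1) 1).any fun e =>
      let sub := PySem.List.slice s.toList (some start) (some e)
      decide (1 < PySem.List.len sub) && pvIsPalindrome sub

-- ===== PORT B =====
-- 'for i in range(n - 1): if s[i] == s[i+1] or (i + 2 < n and s[i] == s[i+2]): return True'
def has_valid_palindrome_alt (s : String) : Bool :=
  (PySem.List.pyRange 0 (PySem.List.len s.toList - 1) 1).any fun i =>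
    (PySem.List.pyGet? s.toList i == PySem.List.pyGet? s.toList (i + 1)) ||
    (decide (i + 2 < PySem.List.len s.toList) &&
      (PySem.List.pyGet? s.toList i == PySem.List.pyGet? s.toList (i + 2)))

-- ===== PRECONDITION & SPEC =====
def Spec_has_valid_palindrome (s : String) (out : Bool) : Prop := out = has_valid_palindrome_alt s
instance (s : String) (out : Bool) : Decidable (Spec_has_valid_palindrome s out) := by unfold Spec_has_valid_palindrome; infer_instance

-- ===== CLAIM (what is proved, stated in full; the proofs are below) =====
def Claim_equal_has_valid_palindrome : Prop := ∀ (s : String), Dom_has_valid_palindrome s → Spec_has_valid_palindrome s (has_valid_palindrome s)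

-- ===== LEMMAS AND PROOFS =====

-- "l has two equal chars at distance k"
def pvClose (l : List Char) (k : Nat) : Prop :=
  ∃ i : Nat, ∃ _h : i + k < l.length, l[i]'(by omega) = l[i + k]'(by omega)


-- getElem at provably equal indices
lemma pvGetCongr (l : List Char) (i j : Nat) (hi : i < l.length) (hj : j < l.length)
    (hij : i = j) : l[i]'hi = l[j]'hj := by subst hij; rfl

lemma pvIsPalAux_pairs (sub : List Char) :
    ∀ (t : Nat) (left right : Int), pvIsPalAux sub left right = true →
      left + t < right - t →
      PySem.List.pyGet? sub (left + t) = PySem.List.pyGet? sub (right - t) := by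
  intro t
  induction t with
  | zero =>
    intro left right h hb
    have hlr : left < right := by omega
    rw [pvIsPalAux] at h
    simp only [hlr, dif_pos] at h
    by_cases he : PySem.List.pyGet? sub left = PySem.List.pyGet? sub right
    · simpa using he
    · rw [if_pos he] at h; exact absurd h (by simp)
  | succ t ih =>
    intro left right h hb
    have hlr : left < right := by push_cast at hb; omega
    rw [pvIsPalAux] at h
    simp only [hlr, dif_pos] at h
    by_cases he : PySem.List.pyGet? sub left = PySem.List.pyGet? sub right
    · have h' : pvIsPalAux sub (left + 1) (right - 1) = true := by
        rwa [if_neg (not_not_intro he)] at h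
      have hrec := ih (left + 1) (right - 1) h' (by push_cast at hb; omega)
      have e1 : left + ((t : Nat) + 1 : Nat) = (left + 1) + (t : Nat) := by push_cast; ring
      have e2 : right - ((t : Nat) + 1 : Nat) = (right - 1) - (t : Nat) := by push_cast; ring
      rw [e1, e2]
      exact hrec
    · rw [if_pos he] at h; exact absurd h (by simp)

lemma pvIsPalindrome_index (sub : List Char) (h : pvIsPalindrome sub = true)
    (t : Nat) (ht : 2 * t + 1 < sub.length) :
    sub[t]? = sub[sub.length - 1 - t]? := by
  unfold pvIsPalindrome at h
  have hb : (0 : Int) + t < ((sub.length : Int) - 1) - t := by omega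
  have := pvIsPalAux_pairs sub t 0 ((PySem.List.len sub) - 1) h (by simpa [PySem.List.len_eq] using hb)
  rw [PySem.List.len_eq] at this
  have e1 : (0 : Int) + (t : Int) = ((t : Nat) : Int) := by ring
  have e2 : ((sub.length : Int) - 1) - (t : Int) = ((sub.length - 1 - t : Nat) : Int) := by omega
  rw [e1, e2, PySem.List.pyGet?_natCast, PySem.List.pyGet?_natCast] at this
  exact this

lemma A_true_close (l : List Char) (h :
    ((PySem.List.pyRange 0 (PySem.List.len l) 1).any fun start =>
      (PySem.List.pyRange (start + 1) (PySem.List.len l + 1) 1).any fun e =>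
        let sub := PySem.List.slice l (some start) (some e)
        decide (1 < PySem.List.len sub) && pvIsPalindrome sub) = true) :
    pvClose l 1 ∨ pvClose l 2 := by
  rw [List.any_eq_true] at h
  obtain ⟨start, hs, h⟩ := h
  rw [List.any_eq_true] at h
  obtain ⟨e, he, h⟩ := h
  rw [PySem.List.mem_pyRange_one] at hs he
  rw [PySem.List.len_eq] at hs he
  simp only [Bool.and_eq_true, decide_eq_true_eq] at h
  obtain ⟨hlen, hpal⟩ := h
  have h0s : 0 ≤ start := hs.1
  have h0e : 0 ≤ e := by omega
  set a := start.toNat with ha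
  set b := e.toNat with hb
  have hbl : b ≤ l.length := by omega
  have hsubeq : PySem.List.slice l (some start) (some e) = (l.drop a).take (b - a) :=
    PySem.List.slice_toNat l h0s h0e
  rw [hsubeq] at hlen hpal
  set sub := (l.drop a).take (b - a) with hsubdef
  have hm : sub.length = min (b - a) (l.length - a) := by
    simp [hsubdef, List.length_take, List.length_drop]
  have hm2 : 2 ≤ sub.length := by rw [PySem.List.len_eq] at hlen; omega
  have hmba : sub.length = b - a := by omega
  set t := (sub.length - 2) / 2 with htdef
  have ht : 2 * t + 1 < sub.length := by omega
  have hidx := pvIsPalindrome_index sub hpal t ht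
  have ht1 : t < sub.length := by omega
  have ht2 : sub.length - 1 - t < sub.length := by omega
  rw [List.getElem?_eq_getElem ht1, List.getElem?_eq_getElem ht2] at hidx
  have hidx' : sub[t]'ht1 = sub[sub.length - 1 - t]'ht2 := Option.some_injective _ hidx
  have hget : ∀ (j : Nat) (hj : j < sub.length), sub[j]'hj = l[a + j]'(by omega) := by
    intro j hj
    exact (List.getElem_take ..).trans (List.getElem_drop ..)
  have heq : l[a + t]'(by omega) = l[a + (sub.length - 1 - t)]'(by omega) := by
    rw [← hget t ht1, ← hget (sub.length - 1 - t) ht2]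
    exact hidx'
  have hd : sub.length - 1 - t = t + 1 ∨ sub.length - 1 - t = t + 2 := by omega
  rcases hd with hd | hd
  · exact Or.inl ⟨a + t, by omega,
      heq.trans (pvGetCongr l (a + (sub.length - 1 - t)) ((a + t) + 1) (by omega) (by omega) (by omega))⟩
  · exact Or.inr ⟨a + t, by omega,
      heq.trans (pvGetCongr l (a + (sub.length - 1 - t)) ((a + t) + 2) (by omega) (by omega) (by omega))⟩

lemma pvIsPal_two (a : Char) : pvIsPalindrome [a, a] = true := by
  unfold pvIsPalindrome
  rw [pvIsPalAux]
  norm_num [PySem.List.len, PySem.List.pyGet?, PySem.List.pyIdx?]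
  rw [pvIsPalAux]
  norm_num

lemma pvIsPal_three (a b : Char) : pvIsPalindrome [a, b, a] = true := by
  unfold pvIsPalindrome
  rw [pvIsPalAux]
  norm_num [PySem.List.len, PySem.List.pyGet?, PySem.List.pyIdx?]
  constructor
  · rfl
  · rw [pvIsPalAux]
    norm_num

-- a center at distance k (k = 1 or 2) makes A return true
lemma close_A_true (l : List Char) (k : Nat) (hk : k = 1 ∨ k = 2) (h : pvClose l k) :
    ((PySem.List.pyRange 0 (PySem.List.len l) 1).any fun start =>
      (PySem.List.pyRange (start + 1) (PySem.List.len l + 1) 1).any fun e =>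
        let sub := PySem.List.slice l (some start) (some e)
        decide (1 < PySem.List.len sub) && pvIsPalindrome sub) = true := by
  obtain ⟨i, hik, he⟩ := h
  rw [List.any_eq_true]
  refine ⟨(i : Int), ?_, ?_⟩
  · rw [PySem.List.mem_pyRange_one, PySem.List.len_eq]
    constructor <;> [positivity; exact_mod_cast (by omega : i < l.length)]
  rw [List.any_eq_true]
  refine ⟨((i + k + 1 : Nat) : Int), ?_, ?_⟩
  · rw [PySem.List.mem_pyRange_one, PySem.List.len_eq]
    constructor
    · exact_mod_cast (by omega : i + 1 ≤ i + k + 1)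
    · exact_mod_cast (by omega : i + k + 1 < l.length + 1)
  · simp only
    rw [PySem.List.slice_natCast]
    have hdrop : l.drop i = l[i]'(by omega) :: l.drop (i + 1) :=
      List.drop_eq_getElem_cons (by omega)
    have hdrop1 : l.drop (i + 1) = l[i + 1]'(by omega) :: l.drop (i + 2) :=
      List.drop_eq_getElem_cons (by omega)
    rcases hk with hk | hk
    · subst hk
      have hsub : (l.drop i).take (i + 1 + 1 - i) = [l[i]'(by omega), l[i + 1]'(by omega)] := by
        rw [show i + 1 + 1 - i = 2 by omega, hdrop, hdrop1]
        rfl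
      rw [hsub]
      simp [PySem.List.len, he, pvIsPal_two]
    · subst hk
      have hdrop2 : l.drop (i + 2) = l[i + 2]'(by omega) :: l.drop (i + 3) :=
        List.drop_eq_getElem_cons (by omega)
      have hsub : (l.drop i).take (i + 2 + 1 - i) =
          [l[i]'(by omega), l[i + 1]'(by omega), l[i + 2]'(by omega)] := by
        rw [show i + 2 + 1 - i = 3 by omega, hdrop, hdrop1, hdrop2]
        rfl
      rw [hsub]
      simp only [PySem.List.len, List.length_cons, List.length_nil]
      rw [he]
      simp [pvIsPal_three]

lemma B_iff (s : String) :
    has_valid_palindrome_alt s = true ↔ pvClose s.toList 1 ∨ pvClose s.toList 2 := by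
  unfold has_valid_palindrome_alt
  rw [List.any_eq_true]
  constructor
  · rintro ⟨i, hi, hc⟩
    rw [PySem.List.mem_pyRange_one, PySem.List.len_eq] at hi
    have h0 : 0 ≤ i := hi.1
    set j := i.toNat with hjdef
    have hj1 : j + 1 < s.toList.length := by omega
    have hci : i = ((j : Nat) : Int) := by omega
    simp only [Bool.or_eq_true, Bool.and_eq_true, beq_iff_eq, decide_eq_true_eq,
      PySem.List.len_eq] at hc
    rcases hc with hc | ⟨hlt, hc⟩
    · left
      rw [hci, show ((j : Nat) : Int) + 1 = ((j + 1 : Nat) : Int) by push_cast; ring,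
        PySem.List.pyGet?_natCast, PySem.List.pyGet?_natCast,
        List.getElem?_eq_getElem (by omega), List.getElem?_eq_getElem hj1] at hc
      exact ⟨j, hj1, Option.some_injective _ hc⟩
    · right
      have hj2 : j + 2 < s.toList.length := by omega
      rw [hci, show ((j : Nat) : Int) + 2 = ((j + 2 : Nat) : Int) by push_cast; ring,
        PySem.List.pyGet?_natCast, PySem.List.pyGet?_natCast,
        List.getElem?_eq_getElem (by omega), List.getElem?_eq_getElem hj2] at hc
      exact ⟨j, hj2, Option.some_injective _ hc⟩
  · rintro (⟨j, hj, he⟩ | ⟨j, hj, he⟩)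
    · refine ⟨(j : Int), ?_, ?_⟩
      · rw [PySem.List.mem_pyRange_one, PySem.List.len_eq]
        constructor
        · positivity
        · omega
      · rw [Bool.or_eq_true]
        left
        rw [show ((j : Nat) : Int) + 1 = ((j + 1 : Nat) : Int) by push_cast; ring,
          PySem.List.pyGet?_natCast, PySem.List.pyGet?_natCast,
          List.getElem?_eq_getElem (by omega), List.getElem?_eq_getElem hj]
        simp [he]
    · refine ⟨(j : Int), ?_, ?_⟩
      · rw [PySem.List.mem_pyRange_one, PySem.List.len_eq]
        constructor
        · positivity
        · omega
      · rw [Bool.or_eq_true]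
        right
        rw [Bool.and_eq_true]
        constructor
        · rw [PySem.List.len_eq]
          exact decide_eq_true (by omega)
        · rw [show ((j : Nat) : Int) + 2 = ((j + 2 : Nat) : Int) by push_cast; ring,
            PySem.List.pyGet?_natCast, PySem.List.pyGet?_natCast,
            List.getElem?_eq_getElem (by omega), List.getElem?_eq_getElem hj]
          simp [he]

-- ===== VERDICT (by name: the statement is the Claim_ definition above) =====
theorem has_valid_palindrome_spec : Claim_equal_has_valid_palindrome := by
  intro s _hdom
  unfold Spec_has_valid_palindrome
  have hAB : has_valid_palindrome s = true ↔ has_valid_palindrome_alt s = true := by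
    rw [B_iff]
    constructor
    · intro h
      exact A_true_close s.toList h
    · rintro (h | h)
      · exact close_A_true s.toList 1 (Or.inl rfl) h
      · exact close_A_true s.toList 2 (Or.inr rfl) h
  cases hA : has_valid_palindrome s <;> cases hB : has_valid_palindrome_alt s <;>
    simp_all
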